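-- pv_equiv track=rewrite | github.com/DiabloBoy/EE4001-Steganography-with-Python | Jupyter/encryption.py | xor_matrix_decrypt
-- ===== SOURCE A (Python) =====
-- def xor_matrix_decrypt(B,key_matrix):
--     temp_array = []
--     for i in range(0,3):
--         temp_array.append(B[0][i] ^ key_matrix[0][i])
--     for j in range(0,3):
--         temp_array.append(B[1][j] ^ key_matrix[1][j])
--     for k in range(0,3):
--         temp_array.append(B[2][k] ^ key_matrix[2][k])
--     matrix = []
--
--     while temp_array != []:
--         matrix.append(temp_array [:3])
--         temp_array  = temp_array [3:]
--
--     return matrix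
-- ===== SOURCE B (Python) =====
-- def xor_matrix_decrypt(B, key_matrix):
--     matrix = []
--     for i in range(3):
--         row = []
--         for j in range(3):
--             row.append(B[i][j] ^ key_matrix[i][j])
--         matrix.append(row)
--     return matrix
-- ===== Notes on version B (the rewrite author's own statement) =====
-- stated objective: simpler
-- what changed: B builds the 3x3 result row by row with one nested loop, dropping A's flatten-into-a-9-element-temp-array phase and its while-loop slice-and-chunk reconstruction.
import Mathlib
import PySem

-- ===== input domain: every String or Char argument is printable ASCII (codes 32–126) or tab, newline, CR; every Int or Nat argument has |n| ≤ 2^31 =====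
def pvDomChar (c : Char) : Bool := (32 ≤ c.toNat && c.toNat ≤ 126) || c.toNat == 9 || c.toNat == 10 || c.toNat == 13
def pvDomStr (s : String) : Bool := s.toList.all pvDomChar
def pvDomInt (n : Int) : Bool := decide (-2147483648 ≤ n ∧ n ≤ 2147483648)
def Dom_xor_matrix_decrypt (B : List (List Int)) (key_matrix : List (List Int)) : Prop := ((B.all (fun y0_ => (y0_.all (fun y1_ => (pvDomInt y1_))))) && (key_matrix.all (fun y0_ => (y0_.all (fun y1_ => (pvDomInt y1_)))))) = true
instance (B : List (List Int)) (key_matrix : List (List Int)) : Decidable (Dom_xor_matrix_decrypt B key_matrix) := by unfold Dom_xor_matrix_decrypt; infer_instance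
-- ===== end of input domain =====

-- B builds the 3x3 result row by row in one nested loop, dropping A's flatten-then-chunk phase.

-- ===== PORT A =====
-- shared indexing helper: m[r][i] with both lookups in-range under Pre_ (getD defaults are never hit there)
def pvRowGet (xs : List (List Int)) (r i : Int) : Int :=
  (PySem.List.pyGet? ((PySem.List.pyGet? xs r).getD []) i).getD 0

-- the 'while temp_array != []' chunking loop of A
def pvChunk3 : List Int → List (List Int)
  | [] => []
  | x :: xs =>
    PySem.List.slice (x :: xs) none (some 3) :: pvChunk3 (PySem.List.slice (x :: xs) (some 3) none)
termination_by l => l.length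
decreasing_by
  have h : PySem.List.slice (x :: xs) (some 3) none = (x :: xs).drop 3 :=
    PySem.List.slice_from_natCast (x :: xs) 3
  simp [h, List.length_drop]

def xor_matrix_decrypt (B : List (List Int)) (key_matrix : List (List Int)) : List (List Int) :=
  let t1 := (PySem.List.pyRange 0 3 1).foldl
    (fun acc i => acc ++ [PySem.Int.bxor (pvRowGet B 0 i) (pvRowGet key_matrix 0 i)]) []
  let t2 := (PySem.List.pyRange 0 3 1).foldl
    (fun acc j => acc ++ [PySem.Int.bxor (pvRowGet B 1 j) (pvRowGet key_matrix 1 j)]) t1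
  let t3 := (PySem.List.pyRange 0 3 1).foldl
    (fun acc k => acc ++ [PySem.Int.bxor (pvRowGet B 2 k) (pvRowGet key_matrix 2 k)]) t2
  pvChunk3 t3

-- ===== PORT B =====
def xor_matrix_decrypt_alt (B : List (List Int)) (key_matrix : List (List Int)) : List (List Int) :=
  (PySem.List.pyRange 0 3 1).foldl
    (fun mat i =>
      mat ++ [(PySem.List.pyRange 0 3 1).foldl
        (fun row j => row ++ [PySem.Int.bxor (pvRowGet B i j) (pvRowGet key_matrix i j)]) []])
    []

-- ===== PRECONDITION & SPEC =====
-- Pre_ = the shapes A accepts: at least 3 rows in each argument, the first 3 rows each of length ≥ 3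
-- (anywhere else A raises IndexError).
def Pre_xor_matrix_decrypt (B : List (List Int)) (key_matrix : List (List Int)) : Prop :=
  3 ≤ B.length ∧ 3 ≤ key_matrix.length ∧
  (∀ r ∈ B.take 3, 3 ≤ r.length) ∧ (∀ r ∈ key_matrix.take 3, 3 ≤ r.length)
instance (B : List (List Int)) (key_matrix : List (List Int)) : Decidable (Pre_xor_matrix_decrypt B key_matrix) := by unfold Pre_xor_matrix_decrypt; infer_instance

def pvWitness_xor_matrix_decrypt : List (List Int) × List (List Int) :=
  ([[1,2,3],[4,5,6],[7,8,9]], [[9,8,7],[6,5,4],[3,2,1]])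

def Spec_xor_matrix_decrypt (B : List (List Int)) (key_matrix : List (List Int)) (out : List (List Int)) : Prop := out = xor_matrix_decrypt_alt B key_matrix
instance (B : List (List Int)) (key_matrix : List (List Int)) (out : List (List Int)) : Decidable (Spec_xor_matrix_decrypt B key_matrix out) := by unfold Spec_xor_matrix_decrypt; infer_instance

-- ===== CLAIM (what is proved, stated in full; the proofs are below) =====
def Claim_equal_xor_matrix_decrypt : Prop := ∀ (B : List (List Int)) (key_matrix : List (List Int)), Dom_xor_matrix_decrypt B key_matrix → Pre_xor_matrix_decrypt B key_matrix → Spec_xor_matrix_decrypt B key_matrix (xor_matrix_decrypt B key_matrix)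

-- ===== LEMMAS AND PROOFS =====
theorem pvRange3 : PySem.List.pyRange 0 3 1 = [0, 1, 2] := by decide

-- ===== VERDICT (by name: the statement is the Claim_ definition above) =====
theorem xor_matrix_decrypt_spec : Claim_equal_xor_matrix_decrypt := by
  intro B K _ hpre
  obtain ⟨hB, hK, hBr, hKr⟩ := hpre
  unfold Spec_xor_matrix_decrypt
  rcases B with _ | ⟨b0, B⟩; · simp at hB
  rcases B with _ | ⟨b1, B⟩; · simp at hB
  rcases B with _ | ⟨b2, B⟩; · simp at hB
  rcases K with _ | ⟨k0, K⟩; · simp at hK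
  rcases K with _ | ⟨k1, K⟩; · simp at hK
  rcases K with _ | ⟨k2, K⟩; · simp at hK
  have hb0 := hBr b0 (by simp); have hb1 := hBr b1 (by simp); have hb2 := hBr b2 (by simp)
  have hk0 := hKr k0 (by simp); have hk1 := hKr k1 (by simp); have hk2 := hKr k2 (by simp)
  rcases b0 with _ | ⟨a00, b0⟩; · simp at hb0
  rcases b0 with _ | ⟨a01, b0⟩; · simp at hb0
  rcases b0 with _ | ⟨a02, b0⟩; · simp at hb0
  rcases b1 with _ | ⟨a10, b1⟩; · simp at hb1
  rcases b1 with _ | ⟨a11, b1⟩; · simp at hb1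
  rcases b1 with _ | ⟨a12, b1⟩; · simp at hb1
  rcases b2 with _ | ⟨a20, b2⟩; · simp at hb2
  rcases b2 with _ | ⟨a21, b2⟩; · simp at hb2
  rcases b2 with _ | ⟨a22, b2⟩; · simp at hb2
  rcases k0 with _ | ⟨c00, k0⟩; · simp at hk0
  rcases k0 with _ | ⟨c01, k0⟩; · simp at hk0
  rcases k0 with _ | ⟨c02, k0⟩; · simp at hk0
  rcases k1 with _ | ⟨c10, k1⟩; · simp at hk1
  rcases k1 with _ | ⟨c11, k1⟩; · simp at hk1
  rcases k1 with _ | ⟨c12, k1⟩; · simp at hk1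
  rcases k2 with _ | ⟨c20, k2⟩; · simp at hk2
  rcases k2 with _ | ⟨c21, k2⟩; · simp at hk2
  rcases k2 with _ | ⟨c22, k2⟩; · simp at hk2
  have c1 : ∀ n : Nat, (0:Int) ≤ (n:Int) + 1 := fun n => by omega
  have c2 : ∀ n : Nat, (0:Int) ≤ (n:Int) + 1 + 1 := fun n => by omega
  have c3 : ∀ n : Nat, (2:Int) ≤ (n:Int) + 1 + 1 := fun n => by omega
  have d0 : ∀ n : Nat, (0:Int) < (n:Int) + 1 + 1 + 1 := fun n => by omega
  have d1 : ∀ n : Nat, (1:Int) < (n:Int) + 1 + 1 + 1 := fun n => by omega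
  have d2 : ∀ n : Nat, (2:Int) < (n:Int) + 1 + 1 + 1 := fun n => by omega
  simp [xor_matrix_decrypt, xor_matrix_decrypt_alt, pvRange3, pvRowGet,
    PySem.List.pyGet?, PySem.List.pyIdx?, pvChunk3, PySem.List.slice,
    c1, c2, c3, d0, d1, d2]
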